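-- pv_equiv track=rewrite | github.com/calelamb/doordrill | backend/app/services/grading_service.py | _has_recovery_arc
-- ===== SOURCE A (Python) =====
-- def _has_recovery_arc(trajectory: list[str]) -> bool:
--     emotions = [str(item) for item in trajectory if str(item).strip()]
--     if not emotions:
--         return False
--     hard_indices = [index for index, emotion in enumerate(emotions) if emotion in {"hostile", "annoyed"}]
--     if not hard_indices:
--         return False
--     return any(
--         later in {"neutral", "curious", "interested"}
--         for index in hard_indices
--         for later in emotions[index + 1 :]
--     )
-- ===== SOURCE B (Python) =====
-- def _has_recovery_arc(trajectory: list[str]) -> bool: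
--     seen_hard = False
--     for item in trajectory:
--         emotion = str(item)
--         if not emotion.strip():
--             continue
--         if seen_hard and emotion in {"neutral", "curious", "interested"}:
--             return True
--         if emotion in {"hostile", "annoyed"}:
--             seen_hard = True
--     return False
-- ===== Notes on version B (the rewrite author's own statement) =====
-- stated objective: simpler
-- what changed: Replaces A's list-building passes and nested any over every hard index's suffix with a single forward scan carrying a seen-hard flag that returns at the first positive emotion after a hard one (intended as faster; measured ~1.5x at the largest size but not consistently confirmed).
import Mathlib
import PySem

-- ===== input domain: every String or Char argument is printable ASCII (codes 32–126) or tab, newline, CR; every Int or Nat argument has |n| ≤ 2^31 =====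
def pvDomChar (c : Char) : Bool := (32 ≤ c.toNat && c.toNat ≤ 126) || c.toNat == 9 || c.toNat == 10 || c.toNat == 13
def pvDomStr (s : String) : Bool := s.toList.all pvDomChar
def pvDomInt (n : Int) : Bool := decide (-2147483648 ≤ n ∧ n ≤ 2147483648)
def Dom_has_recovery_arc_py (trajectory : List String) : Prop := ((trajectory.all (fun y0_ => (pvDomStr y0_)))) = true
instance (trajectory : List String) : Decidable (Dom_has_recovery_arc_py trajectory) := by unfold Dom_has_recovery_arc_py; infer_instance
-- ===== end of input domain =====

-- B replaces A's list-building passes and nested suffix scan by one forward pass with a seen-hard flag (objective: simpler).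

-- ===== PORT A =====
def has_recovery_arc_py (trajectory : List String) : Bool :=
  let emotions := trajectory.filter (fun s => !(PySem.Str.strip s == ""))
  if emotions.isEmpty then false
  else
    let hard_indices := (PySem.List.enumerate emotions).filter
      (fun p => p.2 == "hostile" || p.2 == "annoyed")
    if hard_indices.isEmpty then false
    else hard_indices.any (fun p =>
      (PySem.List.slice emotions (some (p.1 + 1)) none).any
        (fun later => later == "neutral" || later == "curious" || later == "interested"))

-- ===== PORT B =====
def pvAltLoop : List String → Bool → Bool
  | [], _ => false
  | e :: rest, seen =>
    if PySem.Str.strip e == "" then pvAltLoop rest seen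
    else if seen && (e == "neutral" || e == "curious" || e == "interested") then true
    else pvAltLoop rest (seen || (e == "hostile" || e == "annoyed"))

def has_recovery_arc_py_alt (trajectory : List String) : Bool := pvAltLoop trajectory false

-- ===== PRECONDITION & SPEC =====
def Spec_has_recovery_arc_py (trajectory : List String) (out : Bool) : Prop := out = has_recovery_arc_py_alt trajectory
instance (trajectory : List String) (out : Bool) : Decidable (Spec_has_recovery_arc_py trajectory out) := by unfold Spec_has_recovery_arc_py; infer_instance

-- ===== CLAIM (what is proved, stated in full; the proofs are below) =====
def Claim_equal_has_recovery_arc_py : Prop := ∀ (trajectory : List String), Dom_has_recovery_arc_py trajectory → Spec_has_recovery_arc_py trajectory (has_recovery_arc_py trajectory)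

-- ===== LEMMAS AND PROOFS =====

def pvIsHard (e : String) : Bool := e == "hostile" || e == "annoyed"
def pvIsPos (e : String) : Bool := e == "neutral" || e == "curious" || e == "interested"

-- "hard somewhere, positive strictly later" as a simple recursion
def pvHp : List String → Bool
  | [] => false
  | e :: rest => (pvIsHard e && rest.any pvIsPos) || pvHp rest

-- B's loop on the already-filtered list
def pvCore : List String → Bool → Bool
  | [], _ => false
  | e :: rest, seen =>
    if seen && pvIsPos e then true else pvCore rest (seen || pvIsHard e)

lemma pvAltLoop_eq_core (xs : List String) (seen : Bool) :
    pvAltLoop xs seen = pvCore (xs.filter (fun s => !(PySem.Str.strip s == ""))) seen := by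
  induction xs generalizing seen with
  | nil => rfl
  | cons e rest ih =>
    cases hb : (PySem.Str.strip e == "") with
    | true => simp [pvAltLoop, hb, ih]
    | false =>
      simp only [pvAltLoop, hb, Bool.false_eq_true, if_false, List.filter_cons,
        Bool.not_false, if_true, pvCore, pvIsPos, pvIsHard]
      by_cases hc : (seen && (e == "neutral" || e == "curious" || e == "interested")) = true
      · simp [hc]
      · simp only [if_neg hc]
        exact ih _

lemma pvCore_eq (xs : List String) (seen : Bool) :
    pvCore xs seen = ((seen && xs.any pvIsPos) || pvHp xs) := by
  induction xs generalizing seen with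
  | nil => simp [pvCore, pvHp]
  | cons e rest ih =>
    simp only [pvCore, pvHp, List.any_cons]
    split
    · rename_i h
      simp at h
      simp [h.1, h.2]
    · rename_i h
      rw [ih]
      cases seen <;> cases hp : pvIsPos e <;> cases hh : pvIsHard e <;> simp_all

-- A's nested any over enumerated hard indices equals pvHp on the same list
lemma pvAval_eq_hp (L : List String) : ∀ (n : Nat) (t : List String), L.drop n = t →
    (((PySem.List.enumerate t (n : Int)).filter (fun p => pvIsHard p.2)).any (fun p =>
      (PySem.List.slice L (some (p.1 + 1)) none).any pvIsPos)) = pvHp t := by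
  intro n t
  induction t generalizing n with
  | nil => intro _; simp [PySem.List.enumerate, pvHp]
  | cons e rest ih =>
    intro hdrop
    have hrest : L.drop (n + 1) = rest := by
      rw [← List.drop_drop, hdrop]; rfl
    rw [PySem.List.enumerate_cons]
    simp only [List.filter_cons]
    have hslice : PySem.List.slice L (some ((n : Int) + 1)) none = rest := by
      have : ((n : Int) + 1) = ((n + 1 : Nat) : Int) := by push_cast; ring
      rw [this, PySem.List.slice_from_natCast, hrest]
    have hih := ih (n + 1) (by exact_mod_cast hrest)
    have hcast : ((n : Int) + 1) = ((n + 1 : Nat) : Int) := by push_cast; ring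
    rw [hcast] at *
    cases hh : pvIsHard e
    · simp only [if_neg, Bool.false_eq_true, not_false_iff]
      rw [hih]
      simp [pvHp, hh]
    · simp only [if_pos]
      simp only [List.any_cons, hih]
      simp [pvHp, hh, hslice]

-- ===== VERDICT (by name: the statement is the Claim_ definition above) =====
theorem has_recovery_arc_py_spec : Claim_equal_has_recovery_arc_py := by
  intro t _
  unfold Spec_has_recovery_arc_py has_recovery_arc_py has_recovery_arc_py_alt
  rw [pvAltLoop_eq_core, pvCore_eq]
  simp only [Bool.false_and, Bool.false_or]
  set es := t.filter (fun s => !(PySem.Str.strip s == "")) with hes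
  have key := pvAval_eq_hp es 0 es (by simp)
  simp only [Nat.cast_zero] at key
  by_cases h1 : es.isEmpty
  · simp only [h1, if_true]
    rw [List.isEmpty_iff] at h1
    simp [h1, pvHp]
  · simp only [h1, if_false, Bool.false_eq_true]
    by_cases h2 : ((PySem.List.enumerate es (0:Int)).filter (fun p => p.2 == "hostile" || p.2 == "annoyed")).isEmpty
    · rw [if_pos]
      · rw [← key]
        rw [List.isEmpty_iff] at h2
        have : ((PySem.List.enumerate es (0:Int)).filter (fun p => pvIsHard p.2)) = [] := by
          simpa [pvIsHard] using h2
        rw [this]; rfl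
      · simpa [PySem.List.enumerate] using h2
    · rw [if_neg (by simpa [PySem.List.enumerate] using h2)]
      rw [← key]
      rfl
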